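-- pv_equiv track=rewrite | github.com/suphotsudsee/jhcis-node-agent | node-script/sync_agent.py | parse_summary_types
-- ===== SOURCE A (Python) =====
-- from typing import Any, Dict, List, Optional
--
-- SUMMARY_TYPES = [
--     "OP",        # Outpatient
--     "IP",        # Inpatient
--     "ER",        # Emergency
--     "PP",        # Preventive & Promotive
--     "Pharmacy",  # Pharmacy
--     "Lab",       # Laboratory
--     "Radiology", # Radiology
--     "Financial", # Financial
--     "Resource",  # Resource/HR
--     "PERSON",    # Person registry snapshot
-- ]
--
-- def parse_summary_types(summary_type_arg: Optional[str], all_types: bool = False) -> List[str]: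
--     """Parse and validate summary types from CLI or GUI input."""
--     if all_types or not summary_type_arg:
--         return SUMMARY_TYPES
--
--     summary_types = [t.strip() for t in summary_type_arg.split(',') if t.strip()]
--     invalid = set(summary_types) - set(SUMMARY_TYPES)
--     if invalid:
--         raise ValueError(f"Invalid summary types: {sorted(invalid)}. Valid types: {SUMMARY_TYPES}")
--
--     return summary_types
-- ===== SOURCE B (Python) =====
-- from typing import List, Optional
--
-- SUMMARY_TYPES = [
--     "OP",        # Outpatient
--     "IP",        # Inpatient
--     "ER",        # Emergency
--     "PP",        # Preventive & Promotive
--     "Pharmacy",  # Pharmacy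
--     "Lab",       # Laboratory
--     "Radiology", # Radiology
--     "Financial", # Financial
--     "Resource",  # Resource/HR
--     "PERSON",    # Person registry snapshot
-- ]
--
-- def parse_summary_types(summary_type_arg: Optional[str], all_types: bool = False) -> List[str]:
--     """Parse and validate summary types from CLI or GUI input."""
--     if all_types or not summary_type_arg:
--         return SUMMARY_TYPES
--     result = []
--     invalid = set()
--     for token in summary_type_arg.split(','):
--         t = token.strip()
--         if not t:
--             continue
--         if t in SUMMARY_TYPES:
--             result.append(t)
--         else:
--             invalid.add(t)
--     if invalid:
--         raise ValueError(f"Invalid summary types: {sorted(invalid)}. Valid types: {SUMMARY_TYPES}")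
--     return result
-- ===== Notes on version B (the rewrite author's own statement) =====
-- stated objective: simpler
-- what changed: Replaced A's two-pass structure (list comprehension, then set-of-tokens minus set-of-valid-types difference) with one fused loop over the split tokens that strips each token, skips empties, and sorts it into the result list or the invalid set as it goes.
import Mathlib
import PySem

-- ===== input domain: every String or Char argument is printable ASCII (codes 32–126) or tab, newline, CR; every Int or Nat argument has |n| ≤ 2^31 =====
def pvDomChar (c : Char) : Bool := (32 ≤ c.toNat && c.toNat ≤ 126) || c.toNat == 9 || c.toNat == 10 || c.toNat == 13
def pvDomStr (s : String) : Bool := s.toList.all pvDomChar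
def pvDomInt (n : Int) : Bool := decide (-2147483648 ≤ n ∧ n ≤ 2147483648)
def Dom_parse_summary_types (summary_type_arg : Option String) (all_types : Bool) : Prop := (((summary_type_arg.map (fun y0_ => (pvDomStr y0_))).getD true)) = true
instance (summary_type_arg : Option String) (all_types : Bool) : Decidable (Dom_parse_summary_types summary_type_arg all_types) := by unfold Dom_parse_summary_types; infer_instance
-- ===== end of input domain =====

-- B fuses A's two passes (list comprehension, then set difference) into one loop over the split
-- tokens (objective: simpler). Both A and B raise ValueError on any unrecognised token;
-- Pre_ excludes exactly those inputs.

-- ===== PORT A =====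
def pvSUMMARY_TYPES : List String :=
  ["OP", "IP", "ER", "PP", "Pharmacy", "Lab", "Radiology", "Financial", "Resource", "PERSON"]

-- A's comprehension: [t.strip() for t in summary_type_arg.split(',') if t.strip()]
def pvA_summary_types (s : String) : List String :=
  (((PySem.Str.split? s ",").getD []).filter
    (fun t => !(PySem.Str.strip t == ""))).map PySem.Str.strip

def parse_summary_types (summary_type_arg : Option String) (all_types : Bool) : List String :=
  if all_types || (match summary_type_arg with | none => true | some s => s == "") then
    pvSUMMARY_TYPES
  else
    match summary_type_arg with
    | none => pvSUMMARY_TYPES  -- unreachable: none was caught by the guard above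
    | some s =>
      if (PySem.Set.diff (PySem.Set.ofList (pvA_summary_types s)) pvSUMMARY_TYPES).isEmpty then
        pvA_summary_types s
      else []  -- Python raises ValueError here; excluded by Pre_

-- ===== PORT B =====
-- B's loop body: strip, skip empties, append valid tokens to result, add invalid ones to the set
def pvB_step (acc : List String × PySem.Set String) (tok : String) :
    List String × PySem.Set String :=
  let t := PySem.Str.strip tok
  if t == "" then acc
  else if pvSUMMARY_TYPES.contains t then (acc.1 ++ [t], acc.2)
  else (acc.1, PySem.Set.add acc.2 t)

def parse_summary_types_alt (summary_type_arg : Option String) (all_types : Bool) : List String :=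
  if all_types || (match summary_type_arg with | none => true | some s => s == "") then
    pvSUMMARY_TYPES
  else
    match summary_type_arg with
    | none => pvSUMMARY_TYPES  -- unreachable: none was caught by the guard above
    | some s =>
      let p := ((PySem.Str.split? s ",").getD []).foldl pvB_step ([], PySem.Set.empty)
      if p.2.isEmpty then p.1
      else []  -- Python raises ValueError here; excluded by Pre_

-- ===== PRECONDITION & SPEC =====
-- Pre_ excludes exactly the inputs on which A raises ValueError: a non-empty argument, with
-- all_types false, containing a stripped non-empty token that is not a valid summary type.
def Pre_parse_summary_types (summary_type_arg : Option String) (all_types : Bool) : Prop :=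
  all_types = true ∨
    (match summary_type_arg with
     | none => True
     | some s => s = "" ∨
         ∀ t ∈ (PySem.Str.split? s ",").getD [],
           PySem.Str.strip t ≠ "" → PySem.Str.strip t ∈ pvSUMMARY_TYPES)

instance (summary_type_arg : Option String) (all_types : Bool) :
    Decidable (Pre_parse_summary_types summary_type_arg all_types) := by
  unfold Pre_parse_summary_types; cases summary_type_arg <;> infer_instance

def pvWitness_parse_summary_types : Option String × Bool := (some "OP, Lab ,,PERSON", false)

def Spec_parse_summary_types (summary_type_arg : Option String) (all_types : Bool) (out : List String) : Prop := out = parse_summary_types_alt summary_type_arg all_types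
instance (summary_type_arg : Option String) (all_types : Bool) (out : List String) : Decidable (Spec_parse_summary_types summary_type_arg all_types out) := by unfold Spec_parse_summary_types; infer_instance

-- ===== CLAIM (what is proved, stated in full; the proofs are below) =====
def Claim_equal_parse_summary_types : Prop := ∀ (summary_type_arg : Option String) (all_types : Bool), Dom_parse_summary_types summary_type_arg all_types → Pre_parse_summary_types summary_type_arg all_types → Spec_parse_summary_types summary_type_arg all_types (parse_summary_types summary_type_arg all_types)

-- ===== LEMMAS AND PROOFS =====

-- B's fused loop, when every stripped non-empty token is valid, appends exactly the stripped
-- non-empty tokens to the result and leaves the invalid set untouched.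
theorem pv_foldB (ts : List String) (res : List String) (inv : PySem.Set String)
    (h : ∀ t ∈ ts, PySem.Str.strip t ≠ "" → PySem.Str.strip t ∈ pvSUMMARY_TYPES) :
    ts.foldl pvB_step (res, inv)
      = (res ++ ((ts.filter (fun t => !(PySem.Str.strip t == ""))).map PySem.Str.strip), inv) := by
  induction ts generalizing res with
  | nil => simp
  | cons t ts ih =>
    have ht := h t (by simp)
    have htail : ∀ u ∈ ts, PySem.Str.strip u ≠ "" → PySem.Str.strip u ∈ pvSUMMARY_TYPES :=
      fun u hu => h u (by simp [hu])
    by_cases he : PySem.Str.strip t = ""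
    · simpa [List.foldl_cons, pvB_step, he] using ih res htail
    · have hmem : pvSUMMARY_TYPES.contains (PySem.Str.strip t) = true := by
        simpa [List.contains_iff_mem] using ht he
      simpa [List.foldl_cons, pvB_step, he, hmem, ht he] using ih (res ++ [PySem.Str.strip t]) htail

-- A's set difference is empty when every stripped non-empty token is valid.
theorem pv_diff_nil (xs : List String) (h : ∀ x ∈ xs, x ∈ pvSUMMARY_TYPES) :
    PySem.Set.diff (PySem.Set.ofList xs) pvSUMMARY_TYPES = [] := by
  simp only [PySem.Set.diff, List.filter_eq_nil_iff]
  intro x hx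
  have hx' : x ∈ xs := (PySem.Set.mem_ofList _ _).mp hx
  simpa [List.contains_iff_mem] using h x hx'

-- ===== VERDICT (by name: the statement is the Claim_ definition above) =====
theorem parse_summary_types_spec : Claim_equal_parse_summary_types := by
  intro arg all_types _ hpre
  unfold Spec_parse_summary_types parse_summary_types parse_summary_types_alt
  by_cases hat : all_types = true
  · simp [hat]
  · simp only [Bool.not_eq_true] at hat
    subst hat
    match arg with
    | none => simp
    | some s =>
      by_cases hs : s = ""
      · simp [hs]
      · have hpre' : ∀ t ∈ (PySem.Str.split? s ",").getD [],
            PySem.Str.strip t ≠ "" → PySem.Str.strip t ∈ pvSUMMARY_TYPES := by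
          rcases hpre with h | h
          · simp at h
          · rcases h with h | h
            · exact absurd h hs
            · exact h
        have hB := pv_foldB ((PySem.Str.split? s ",").getD []) [] ([] : PySem.Set String) hpre'
        have hA : PySem.Set.diff
            (PySem.Set.ofList ((((PySem.Str.split? s ",").getD []).filter
              (fun t => !(PySem.Str.strip t == ""))).map PySem.Str.strip)) pvSUMMARY_TYPES = [] := by
          apply pv_diff_nil
          intro x hx
          simp only [List.mem_map, List.mem_filter] at hx
          rcases hx with ⟨t, ⟨ht, hne⟩, rfl⟩
          exact hpre' t ht (by simpa using hne)
        simp [hs, hB, hA, pvA_summary_types]
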